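-- pv_equiv track=rewrite | github.com/AkAsHLW-07/Akash | main (6).py | int_list
-- ===== SOURCE A (Python) =====
-- def int_list(list1):
--
--     even_num=[]
--     odd_num=[]
--     for i in list1:
--
--         if i%2==0:
--
--
--             even_num.append(i*i)
--         else:
--
--             odd_num.append(i)
--
--     return even_num+odd_num
-- ===== SOURCE B (Python) =====
-- def int_list(list1):
--     # Stable sort by parity key (0 for even, 1 for odd) brings the evens (in
--     # original order) before the odds (in original order); then square the evens.
--     return [x * x if x % 2 == 0 else x for x in sorted(list1, key=lambda i: i % 2)]
-- ===== Notes on version B (the rewrite author's own statement) =====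
-- stated objective: alternative
-- what changed: Replaces the single partitioning loop with two accumulators by a stable sort of the whole list on the parity key i%2 (evens before odds, order preserved) followed by one map that squares the evens.
import Mathlib
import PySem

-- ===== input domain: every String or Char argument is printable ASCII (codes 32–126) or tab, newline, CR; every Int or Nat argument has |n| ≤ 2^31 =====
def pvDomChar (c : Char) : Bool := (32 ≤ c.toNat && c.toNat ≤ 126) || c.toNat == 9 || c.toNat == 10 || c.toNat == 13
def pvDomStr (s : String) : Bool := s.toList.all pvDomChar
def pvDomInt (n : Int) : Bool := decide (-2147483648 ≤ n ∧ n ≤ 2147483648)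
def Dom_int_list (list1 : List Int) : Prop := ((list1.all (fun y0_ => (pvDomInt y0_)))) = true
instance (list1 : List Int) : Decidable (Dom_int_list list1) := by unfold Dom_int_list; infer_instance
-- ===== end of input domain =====

-- B replaces A's partitioning loop by a stable sort on the parity key followed by one map; objective: alternative algorithm.

-- ===== PORT A =====
-- A: one pass accumulating squared evens and odds into two lists, then concatenates.
def int_list (list1 : List Int) : List Int :=
  let p := list1.foldl (fun (acc : List Int × List Int) i =>
    if PySem.Int.mod i 2 == 0 then (acc.1 ++ [i * i], acc.2)
    else (acc.1, acc.2 ++ [i])) ([], [])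
  p.1 ++ p.2

-- ===== PORT B =====
-- B: stable sort by the parity key i % 2 (evens before odds, original order kept),
-- then one map squaring the evens.
def int_list_alt (list1 : List Int) : List Int :=
  (PySem.List.sorted list1 (fun i => PySem.Int.mod i 2)).map
    (fun x => if PySem.Int.mod x 2 == 0 then x * x else x)

-- ===== PRECONDITION & SPEC =====
def Spec_int_list (list1 : List Int) (out : List Int) : Prop := out = int_list_alt list1
instance (list1 : List Int) (out : List Int) : Decidable (Spec_int_list list1 out) := by unfold Spec_int_list; infer_instance

-- ===== CLAIM =====
def Claim_equal_int_list : Prop := ∀ (list1 : List Int), Dom_int_list list1 → Spec_int_list list1 (int_list list1)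

-- ===== LEMMAS AND PROOFS =====

theorem m2 (i : Int) : PySem.Int.mod i 2 = i % 2 :=
  PySem.Int.mod_eq_emod_of_pos (by norm_num)

theorem insertBy_even (x : Int) (hx : x % 2 = 0) (e o : List Int)
    (he : ∀ y ∈ e, y % 2 = 0) (ho : ∀ y ∈ o, y % 2 = 1) :
    PySem.List.insertBy (fun a b => decide (a % 2 < b % 2)) x (e ++ o)
    = e ++ x :: o := by
  induction e with
  | nil =>
    cases o with
    | nil => simp [PySem.List.insertBy]
    | cons y ys =>
      have hy := ho y (by simp)
      simp [PySem.List.insertBy, hx, hy]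
  | cons a e' ih =>
    have ha := he a (by simp)
    simp [PySem.List.insertBy, hx, ha]
    exact ih (fun y hy => he y (by simp [hy]))

theorem insertBy_odd (x : Int) (hx : x % 2 = 1) (l : List Int) :
    PySem.List.insertBy (fun a b => decide (a % 2 < b % 2)) x l
    = l ++ [x] := by
  apply PySem.List.insertBy_of_forall_not_before
  intro y _
  rcases Int.emod_two_eq y with h | h <;> simp [hx, h]

theorem sorted_parity_aux (xs e o : List Int)
    (he : ∀ y ∈ e, y % 2 = 0) (ho : ∀ y ∈ o, y % 2 = 1) :
    xs.foldl (fun acc x => PySem.List.insertBy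
      (fun a b => decide (a % 2 < b % 2)) x acc) (e ++ o)
    = (e ++ xs.filter (fun i => i % 2 == 0))
      ++ (o ++ xs.filter (fun i => !(i % 2 == 0))) := by
  induction xs generalizing e o with
  | nil => simp
  | cons x xs ih =>
    simp only [List.foldl_cons, List.filter_cons]
    rcases Int.emod_two_eq x with hx | hx
    · rw [insertBy_even x hx e o he ho]
      have h1 : ((x % 2 == 0) : Bool) = true := by rw [hx]; rfl
      rw [h1]
      simp only [Bool.not_true, reduceIte]
      have := ih (e ++ [x]) o
        (by intro y hy; rcases List.mem_append.mp hy with h | h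
            · exact he y h
            · simp at h; exact h ▸ hx) ho
      simpa using this
    · rw [insertBy_odd x hx (e ++ o)]
      have h1 : ((x % 2 == 0) : Bool) = false := by rw [hx]; rfl
      rw [h1]
      simp only [Bool.not_false, reduceIte]
      have := ih e (o ++ [x]) he
        (by intro y hy; rcases List.mem_append.mp hy with h | h
            · exact ho y h
            · simp at h; exact h ▸ hx)
      simpa using this

theorem sorted_parity (xs : List Int) :
    PySem.List.sorted xs (fun i => i % 2)
    = xs.filter (fun i => i % 2 == 0) ++ xs.filter (fun i => !(i % 2 == 0)) := by
  rw [PySem.List.sorted_eq_foldl_insertBy]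
  simpa using sorted_parity_aux xs [] [] (by simp) (by simp)

theorem int_list_foldl (list1 : List Int) (e o : List Int) :
    list1.foldl (fun (acc : List Int × List Int) i =>
      if i % 2 == 0 then (acc.1 ++ [i * i], acc.2)
      else (acc.1, acc.2 ++ [i])) (e, o) =
    (e ++ (list1.filter (fun i => i % 2 == 0)).map (fun i => i * i),
     o ++ list1.filter (fun i => !(i % 2 == 0))) := by
  induction list1 generalizing e o with
  | nil => simp
  | cons x xs ih =>
    simp only [List.foldl_cons, List.filter_cons]
    by_cases h : (x % 2 == 0) = true
    · rw [if_pos h, if_pos h, ih]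
      have h2 : (!(x % 2 == 0)) = false := by rw [h]; rfl
      rw [h2]; simp
    · rw [if_neg h, if_neg h, ih]
      have h2 : (!(x % 2 == 0)) = true := by rw [Bool.eq_false_iff.mpr h]; rfl
      rw [h2]; simp

-- ===== VERDICT =====
theorem int_list_spec : Claim_equal_int_list := by
  intro list1 _
  unfold Spec_int_list int_list int_list_alt
  simp only [m2]
  rw [int_list_foldl, sorted_parity, List.map_append]
  simp only [List.nil_append]
  congr 1
  · apply List.map_congr_left
    intro x hx
    have := (List.mem_filter.mp hx).2
    simp only [beq_iff_eq] at this
    simp [this]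
  · have h : ∀ x ∈ list1.filter (fun i => !((i % 2 == 0) : Bool)),
        (fun x => if (x % 2 == 0 : Bool) then x * x else x) x = id x := by
      intro x hx
      have := (List.mem_filter.mp hx).2
      simp only [Bool.not_eq_true', beq_eq_false_iff_ne] at this
      simp [this]
    rw [List.map_congr_left h, List.map_id]
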